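-- pv_equiv track=rewrite | github.com/atik81/ai-tue | final_Sprint2_and3.py | bfs
-- ===== SOURCE A (Python) =====
-- from queue import Queue
--
-- def bfs(distances,Journey_time,start_city, target_city):
--     q = Queue()     # Initialize a queue for BFS
--
--     visited = set() # a set for visited cities
--
--     q.put((start_city, 0, 0, [start_city]))     # starting city and its distance (0) and path (just the starting city) to the queue
--
--
--     while not q.empty():     # Loop until the queue is empty
--
--         current_city, current_distance,current_journey_time, current_path = q.get()         # this Dequeue the current city, its distance, and its path
--
--
--         if current_city == target_city:         # If the current city is the target city, return the distance ,current_journey_time and path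
--
--             return current_path, current_distance,current_journey_time
--
--         visited.add(current_city)         # it's Add the current city to the set of visited cities
--
--
--         for neighbor_city, distance in distances[current_city].items():         # For each neighboring city of the current city
--             Journey_time_to_neighbor = Journey_time[current_city][neighbor_city]
--             if neighbor_city not in visited:            # If the neighboring city has not been visited yet
--
--                 q.put((neighbor_city, current_distance + distance,current_distance + Journey_time_to_neighbor,current_path + [neighbor_city]))
--
--     return None, None, None     # If the target city cannot be reached from the starting city, return None
-- ===== SOURCE B (Python) =====
-- from collections import deque
--
-- def bfs(distances, Journey_time, start_city, target_city):
--     q = deque([start_city])          # FIFO queue of city names only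
--     visited = set()
--     parent = {}                      # predecessor at first enqueue (absent for start)
--     dist = {start_city: 0}           # distance recorded at first enqueue
--     jtime = {start_city: 0}          # journey time recorded at first enqueue
--     while q:
--         current = q.popleft()
--         if current == target_city:
--             path = [current]
--             while path[-1] in parent:
--                 path.append(parent[path[-1]])
--             path.reverse()
--             return path, dist[current], jtime[current]
--         visited.add(current)
--         for neighbor, d in distances[current].items():
--             jt = Journey_time[current][neighbor]
--             if neighbor not in visited:
--                 if neighbor not in dist:
--                     parent[neighbor] = current
--                     dist[neighbor] = dist[current] + d
--                     jtime[neighbor] = dist[current] + jt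
--                 q.append(neighbor)
--     return None, None, None
-- ===== Notes on version B (the rewrite author's own statement) =====
-- stated objective: alternative
-- what changed: The queue of (city, distance, journey, path) tuples is replaced by a queue of plain city names with parent/dist/jtime dicts written only at a city's first enqueue, and the path is reconstructed by walking parent pointers backwards from the target; the visiting order is unchanged but duplicate queue entries no longer copy whole path lists.
import Mathlib
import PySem

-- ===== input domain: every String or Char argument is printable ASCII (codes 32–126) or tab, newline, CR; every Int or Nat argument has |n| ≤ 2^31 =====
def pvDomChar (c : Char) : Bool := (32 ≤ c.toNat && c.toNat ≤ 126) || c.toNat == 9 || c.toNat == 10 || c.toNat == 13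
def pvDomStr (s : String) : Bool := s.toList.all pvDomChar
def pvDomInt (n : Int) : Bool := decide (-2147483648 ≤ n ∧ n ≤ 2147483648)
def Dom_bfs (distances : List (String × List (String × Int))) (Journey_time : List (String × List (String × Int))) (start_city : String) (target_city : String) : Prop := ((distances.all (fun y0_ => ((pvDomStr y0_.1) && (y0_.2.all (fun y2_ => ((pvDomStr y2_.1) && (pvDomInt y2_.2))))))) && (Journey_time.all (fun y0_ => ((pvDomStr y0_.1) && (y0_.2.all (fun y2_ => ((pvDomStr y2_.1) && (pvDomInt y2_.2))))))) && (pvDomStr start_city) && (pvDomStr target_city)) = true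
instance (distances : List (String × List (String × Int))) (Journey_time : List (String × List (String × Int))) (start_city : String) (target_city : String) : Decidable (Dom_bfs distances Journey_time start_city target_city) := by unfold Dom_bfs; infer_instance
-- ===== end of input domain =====

-- B replaces A's queue of (city, distance, journey, path) tuples by a queue of plain city
-- names plus parent/dist/jtime dicts written at first enqueue, reconstructing the path by
-- walking parent pointers — objective: alternative data structure, same visiting order.

-- ===== PORT A =====
-- dict lookup distances[c] (first match; Python raises KeyError when absent — those inputs
-- are outside Pre_bfs, the total port uses [] there)
def pvNbrs (m : List (String × List (String × Int))) (c : String) : List (String × Int) :=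
  ((PySem.Dict.mk m).get? c).getD []

-- Journey_time[c][n] (KeyError excluded by Pre_bfs; total port uses 0 there)
def pvJT (m : List (String × List (String × Int))) (c : String) (n : String) : Int :=
  (PySem.Dict.mk (pvNbrs m c)).getD n 0

-- fuel for the while-loop: every queue entry corresponds to a distinct simple path from
-- start, so (E+2)^(E+2)+2 iterations (E = total adjacency length) are never exhausted
def pvFuel (distances : List (String × List (String × Int))) : Nat :=
  ((distances.map (fun p => p.2.length)).sum + 2) ^ ((distances.map (fun p => p.2.length)).sum + 2) + 2

-- loop body of A's `for neighbor_city, distance in distances[current_city].items(): …`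
def stepA (Journey_time : List (String × List (String × Int))) (c : String)
    (visited' : PySem.Set String) (d : Int) (p : List String)
    (q : List (String × Int × Int × List String)) (nb : String × Int) :
    List (String × Int × Int × List String) :=
  let jt := pvJT Journey_time c nb.1
  if nb.1 ∈ visited' then q
  else q ++ [(nb.1, d + nb.2, d + jt, p ++ [nb.1])]

def bfsLoopA (distances : List (String × List (String × Int)))
    (Journey_time : List (String × List (String × Int))) (target : String) :
    Nat → List (String × Int × Int × List String) → PySem.Set String →
    Option (List String) × Option Int × Option Int
  | 0, _, _ => (none, none, none)
  | _ + 1, [], _ => (none, none, none)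
  | fuel + 1, (c, d, t, p) :: rest, visited =>
    if c = target then (some p, some d, some t)
    else
      let visited' := PySem.Set.add visited c
      bfsLoopA distances Journey_time target fuel
        ((pvNbrs distances c).foldl (stepA Journey_time c visited' d p) rest) visited'

def bfs (distances : List (String × List (String × Int))) (Journey_time : List (String × List (String × Int))) (start_city : String) (target_city : String) : Option (List String) × Option Int × Option Int :=
  bfsLoopA distances Journey_time target_city (pvFuel distances)
    [(start_city, 0, 0, [start_city])] PySem.Set.empty

-- ===== PORT B =====
-- `path = [current]; while path[-1] in parent: path.append(parent[path[-1]])`, built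
-- head-first (the reversed path); fuel = parent.size + 1 (the chain visits distinct keys)
def followRev (parent : PySem.Dict String String) : Nat → String → List String
  | 0, x => [x]
  | fuel + 1, x =>
    match parent.get? x with
    | none => [x]
    | some pr => x :: followRev parent fuel pr

-- loop body of B's neighbor loop: state = (queue, parent, dist, jtime)
def stepB (Journey_time : List (String × List (String × Int))) (c : String)
    (visited' : PySem.Set String)
    (st : List String × PySem.Dict String String × PySem.Dict String Int × PySem.Dict String Int)
    (nb : String × Int) :
    List String × PySem.Dict String String × PySem.Dict String Int × PySem.Dict String Int :=
  let jt := pvJT Journey_time c nb.1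
  if nb.1 ∈ visited' then st
  else if st.2.2.1.contains nb.1 then (st.1 ++ [nb.1], st.2.1, st.2.2.1, st.2.2.2)
  else (st.1 ++ [nb.1], st.2.1.insert nb.1 c,
        st.2.2.1.insert nb.1 (st.2.2.1.getD c 0 + nb.2),
        st.2.2.2.insert nb.1 (st.2.2.1.getD c 0 + jt))

def bfsLoopB (distances : List (String × List (String × Int)))
    (Journey_time : List (String × List (String × Int))) (target : String) :
    Nat → List String → PySem.Set String → PySem.Dict String String →
    PySem.Dict String Int → PySem.Dict String Int →
    Option (List String) × Option Int × Option Int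
  | 0, _, _, _, _, _ => (none, none, none)
  | _ + 1, [], _, _, _, _ => (none, none, none)
  | fuel + 1, c :: rest, visited, parent, dist, jtime =>
    if c = target then
      (some (followRev parent (parent.size + 1) c).reverse,
       some (dist.getD c 0), some (jtime.getD c 0))
    else
      let visited' := PySem.Set.add visited c
      let st := (pvNbrs distances c).foldl (stepB Journey_time c visited')
        (rest, parent, dist, jtime)
      bfsLoopB distances Journey_time target fuel st.1 visited' st.2.1 st.2.2.1 st.2.2.2

def bfs_alt (distances : List (String × List (String × Int))) (Journey_time : List (String × List (String × Int))) (start_city : String) (target_city : String) : Option (List String) × Option Int × Option Int :=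
  bfsLoopB distances Journey_time target_city (pvFuel distances)
    [start_city] PySem.Set.empty (PySem.Dict.mk [])
    (PySem.Dict.mk [(start_city, 0)]) (PySem.Dict.mk [(start_city, 0)])

-- ===== PRECONDITION & SPEC =====
-- Pre_bfs excludes the inputs on which Python A raises KeyError (a dequeued city missing
-- from distances, or a Journey_time[c][n] lookup missing). It requires the WHOLE graph to
-- be well-formed, which also excludes some inputs A returns on (a malformed entry that the
-- BFS never dequeues) — a reachability-closed condition would re-simulate the search.
def Pre_bfs (distances : List (String × List (String × Int))) (Journey_time : List (String × List (String × Int))) (start_city : String) (target_city : String) : Prop :=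
  start_city = target_city ∨
  ((PySem.Dict.mk distances).contains start_city = true ∧
    ∀ p ∈ distances, ∀ q ∈ p.2,
      (PySem.Dict.mk (pvNbrs Journey_time p.1)).contains q.1 = true ∧
      (q.1 = target_city ∨ (PySem.Dict.mk distances).contains q.1 = true))
instance (distances : List (String × List (String × Int))) (Journey_time : List (String × List (String × Int))) (start_city : String) (target_city : String) : Decidable (Pre_bfs distances Journey_time start_city target_city) := by unfold Pre_bfs; infer_instance

def pvWitness_bfs : (List (String × List (String × Int))) × (List (String × List (String × Int))) × String × String :=
  ([("a", [("b", 3)]), ("b", [])], [("a", [("b", 5)]), ("b", [])], "a", "b")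

def Spec_bfs (distances : List (String × List (String × Int))) (Journey_time : List (String × List (String × Int))) (start_city : String) (target_city : String) (out : Option (List String) × Option Int × Option Int) : Prop := out = bfs_alt distances Journey_time start_city target_city
instance (distances : List (String × List (String × Int))) (Journey_time : List (String × List (String × Int))) (start_city : String) (target_city : String) (out : Option (List String) × Option Int × Option Int) : Decidable (Spec_bfs distances Journey_time start_city target_city out) := by unfold Spec_bfs; infer_instance

-- ===== CLAIM (what is proved, stated in full; the proofs are below) =====
def Claim_equal_bfs : Prop := ∀ (distances : List (String × List (String × Int))) (Journey_time : List (String × List (String × Int))) (start_city : String) (target_city : String), Dom_bfs distances Journey_time start_city target_city → Pre_bfs distances Journey_time start_city target_city → Spec_bfs distances Journey_time start_city target_city (bfs distances Journey_time start_city target_city)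

-- ===== LEMMAS AND PROOFS =====

-- payload of every first-occurrence entry of an unvisited city agrees with B's dicts
def GoodQ (parent : PySem.Dict String String) (dist jtime : PySem.Dict String Int)
    (visited : PySem.Set String) (qA : List (String × Int × Int × List String)) : Prop :=
  ∀ pre c d t p suf, qA = pre ++ (c, d, t, p) :: suf →
    c ∉ pre.map (fun e => e.1) → c ∉ visited →
    d = dist.getD c 0 ∧ t = jtime.getD c 0 ∧
    ∀ fuel, parent.size + 1 ≤ fuel → followRev parent fuel c = p.reverse

-- the state relation maintained by the inner (neighbor) loop
def FoldInv (c : String) (visited' : PySem.Set String)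
    (qA : List (String × Int × Int × List String)) (qB : List String)
    (parent : PySem.Dict String String) (dist jtime : PySem.Dict String Int) : Prop :=
  qA.map (fun e => e.1) = qB ∧
  (∀ x : String, dist.contains x = true ↔ (x ∈ qB ∨ x ∈ visited')) ∧
  (∀ v ∈ parent.values, v ∈ visited') ∧
  (∀ x : String, parent.contains x = true → dist.contains x = true) ∧
  GoodQ parent dist jtime visited' qA ∧
  dist.contains c = true

-- the state relation maintained by the outer (while) loop
def BfsInv (distances : List (String × List (String × Int))) (target : String)
    (qA : List (String × Int × Int × List String)) (visited : PySem.Set String)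
    (qB : List String) (parent : PySem.Dict String String)
    (dist jtime : PySem.Dict String Int) : Prop :=
  qA.map (fun e => e.1) = qB ∧
  target ∉ visited ∧
  (∀ x : String, dist.contains x = true ↔ (x ∈ qB ∨ x ∈ visited)) ∧
  (∀ v ∈ parent.values, v ∈ visited) ∧
  (∀ x : String, parent.contains x = true → dist.contains x = true) ∧
  GoodQ parent dist jtime visited qA ∧
  (∀ c ∈ visited, ∀ nb ∈ pvNbrs distances c, nb.1 ∈ visited ∨ nb.1 ∈ qB)

theorem mem_values_of_get? (d : PySem.Dict String String) (x v : String)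
    (h : d.get? x = some v) : v ∈ d.values := by
  unfold PySem.Dict.get? at h
  cases hf : List.find? (fun p => p.1 == x) d.items with
  | none => rw [hf] at h; simp at h
  | some pr =>
    rw [hf] at h
    simp only [Option.map_some, Option.some.injEq] at h
    exact List.mem_map.mpr ⟨pr, List.mem_of_find?_eq_some hf, h⟩

theorem followRev_insert_fresh (parent : PySem.Dict String String) (n c : String)
    (S : PySem.Set String) (hv : ∀ v ∈ parent.values, v ∈ S) (hn : n ∉ S) :
    ∀ fuel x, x ≠ n → followRev (parent.insert n c) fuel x = followRev parent fuel x := by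
  intro fuel
  induction fuel with
  | zero => intro x _; rfl
  | succ f ih =>
    intro x hx
    simp only [followRev, PySem.Dict.get?_insert, if_neg hx]
    cases hg : parent.get? x with
    | none => rfl
    | some pr =>
      have hpr : pr ∈ parent.values := mem_values_of_get? parent x pr hg
      dsimp only
      rw [ih pr (fun he => hn (he ▸ hv pr hpr))]

theorem snoc_decomp {α : Type} (l pre suf : List α) (x e : α)
    (h : l ++ [e] = pre ++ x :: suf) :
    (pre = l ∧ x = e ∧ suf = []) ∨ ∃ suf', suf = suf' ++ [e] ∧ l = pre ++ x :: suf' := by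
  rcases List.append_eq_append_iff.mp h with ⟨as, h1, h2⟩ | ⟨bs, h1, h2⟩
  · cases as with
    | nil =>
      simp only [List.nil_append] at h2
      injection h2 with hx hs
      exact Or.inl ⟨by simpa using h1, hx.symm, hs.symm⟩
    | cons a as' =>
      have hlen := congrArg List.length h2
      simp only [List.length_cons, List.length_append, List.length_nil] at hlen
      omega
  · cases bs with
    | nil =>
      simp only [List.append_nil] at h1
      simp only [List.nil_append] at h2
      injection h2 with hx hs
      exact Or.inl ⟨h1.symm, hx, hs⟩
    | cons b bs' =>
      simp only [List.cons_append] at h2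
      injection h2 with hx hs
      exact Or.inr ⟨bs', hs, by rw [hx]; exact h1⟩

theorem GoodQ_snoc (parent : PySem.Dict String String) (dist jtime : PySem.Dict String Int)
    (visited : PySem.Set String) (qA : List (String × Int × Int × List String))
    (e : String × Int × Int × List String)
    (hq : GoodQ parent dist jtime visited qA)
    (he : e.1 ∈ qA.map (fun x => x.1) ∨
      (e.2.1 = dist.getD e.1 0 ∧ e.2.2.1 = jtime.getD e.1 0 ∧
        ∀ fuel, parent.size + 1 ≤ fuel → followRev parent fuel e.1 = e.2.2.2.reverse)) :
    GoodQ parent dist jtime visited (qA ++ [e]) := by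
  intro pre c d t p suf h hpre hvis
  rcases snoc_decomp qA pre suf (c, d, t, p) e h with ⟨hp, hx, _⟩ | ⟨suf', _, hl⟩
  · subst hp
    rcases he with he | he
    · rw [← hx] at he; exact absurd he hpre
    · rw [← hx] at he; exact he
  · exact hq pre c d t p suf' hl hpre hvis

theorem GoodQ_insert_fresh (parent : PySem.Dict String String)
    (dist jtime : PySem.Dict String Int) (visited : PySem.Set String)
    (qA : List (String × Int × Int × List String)) (n c : String) (v1 v2 : Int)
    (hq : GoodQ parent dist jtime visited qA)
    (hnq : n ∉ qA.map (fun e => e.1))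
    (hpar : parent.contains n = false)
    (hv : ∀ v ∈ parent.values, v ∈ visited)
    (hnvis : n ∉ visited) :
    GoodQ (parent.insert n c) (dist.insert n v1) (jtime.insert n v2) visited qA := by
  intro pre c' d t p suf h hpre hvis
  have hc'q : c' ∈ qA.map (fun e => e.1) := by
    rw [h]; simp
  have hne : c' ≠ n := fun he => hnq (he ▸ hc'q)
  obtain ⟨h1, h2, h3⟩ := hq pre c' d t p suf h hpre hvis
  refine ⟨?_, ?_, ?_⟩
  · rw [PySem.Dict.getD_insert_of_ne _ _ _ hne]; exact h1
  · rw [PySem.Dict.getD_insert_of_ne _ _ _ hne]; exact h2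
  · intro fuel hf
    rw [PySem.Dict.size_insert, if_neg (by simp [hpar])] at hf
    rw [followRev_insert_fresh parent n c visited hv hnvis fuel c' hne]
    exact h3 fuel (by omega)

theorem fold_inv (Journey_time : List (String × List (String × Int)))
    (c : String) (visited' : PySem.Set String) (dc : Int) (pc : List String)
    (hc : c ∈ visited') :
    ∀ (nbrs : List (String × Int)) (qA : List (String × Int × Int × List String))
      (qB : List String) (parent : PySem.Dict String String)
      (dist jtime : PySem.Dict String Int),
    FoldInv c visited' qA qB parent dist jtime →
    ((dc = dist.getD c 0 ∧
        ∀ fuel, parent.size + 1 ≤ fuel → followRev parent fuel c = pc.reverse) ∨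
      (∀ nb ∈ nbrs, nb.1 ∉ visited' → nb.1 ∈ qB)) →
    FoldInv c visited'
      (nbrs.foldl (stepA Journey_time c visited' dc pc) qA)
      (nbrs.foldl (stepB Journey_time c visited') (qB, parent, dist, jtime)).1
      (nbrs.foldl (stepB Journey_time c visited') (qB, parent, dist, jtime)).2.1
      (nbrs.foldl (stepB Journey_time c visited') (qB, parent, dist, jtime)).2.2.1
      (nbrs.foldl (stepB Journey_time c visited') (qB, parent, dist, jtime)).2.2.2 ∧
    (∀ y ∈ qB, y ∈ (nbrs.foldl (stepB Journey_time c visited') (qB, parent, dist, jtime)).1) ∧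
    (∀ nb ∈ nbrs, nb.1 ∈ visited' ∨
      nb.1 ∈ (nbrs.foldl (stepB Journey_time c visited') (qB, parent, dist, jtime)).1) := by
  intro nbrs
  induction nbrs with
  | nil =>
    intro qA qB parent dist jtime hI _
    exact ⟨hI, fun y hy => hy, by simp⟩
  | cons nb nbrs ih =>
    intro qA qB parent dist jtime hI hsc
    obtain ⟨m1, m3, m4, m7, m5, mc⟩ := hI
    by_cases hv : nb.1 ∈ visited'
    · -- skipped on both sides
      have hA : stepA Journey_time c visited' dc pc qA nb = qA := by
        simp [stepA, hv]
      have hB : stepB Journey_time c visited' (qB, parent, dist, jtime) nb =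
          (qB, parent, dist, jtime) := by
        simp [stepB, hv]
      simp only [List.foldl_cons, hA, hB]
      have hsc' : (dc = dist.getD c 0 ∧
          ∀ fuel, parent.size + 1 ≤ fuel → followRev parent fuel c = pc.reverse) ∨
          (∀ nb' ∈ nbrs, nb'.1 ∉ visited' → nb'.1 ∈ qB) := by
        rcases hsc with h | h
        · exact Or.inl h
        · exact Or.inr (fun nb' hm => h nb' (List.mem_cons_of_mem _ hm))
      obtain ⟨hI', hmono, hnbs⟩ := ih qA qB parent dist jtime ⟨m1, m3, m4, m7, m5, mc⟩ hsc'
      exact ⟨hI', hmono, by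
        intro nb' hm
        rcases List.mem_cons.mp hm with h | h
        · exact Or.inl (h ▸ hv)
        · exact hnbs nb' h⟩
    · by_cases hcont : dist.contains nb.1 = true
      · -- already enqueued: both append to the queue, dicts unchanged
        have hA : stepA Journey_time c visited' dc pc qA nb =
            qA ++ [(nb.1, dc + nb.2, dc + pvJT Journey_time c nb.1, pc ++ [nb.1])] := by
          simp [stepA, hv]
        have hB : stepB Journey_time c visited' (qB, parent, dist, jtime) nb =
            (qB ++ [nb.1], parent, dist, jtime) := by
          simp [stepB, hv, hcont]
        simp only [List.foldl_cons, hA, hB]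
        have hnbq : nb.1 ∈ qB := by
          rcases (m3 nb.1).mp hcont with h | h
          · exact h
          · exact absurd h hv
        have m1' : (qA ++ [(nb.1, dc + nb.2, dc + pvJT Journey_time c nb.1, pc ++ [nb.1])]).map
            (fun e => e.1) = qB ++ [nb.1] := by
          simp [m1]
        have m3' : ∀ x : String, dist.contains x = true ↔ (x ∈ qB ++ [nb.1] ∨ x ∈ visited') := by
          intro x
          constructor
          · intro h
            rcases (m3 x).mp h with h | h
            · exact Or.inl (List.mem_append_left _ h)
            · exact Or.inr h
          · intro h
            rcases h with h | h
            · rcases List.mem_append.mp h with h | h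
              · exact (m3 x).mpr (Or.inl h)
              · simp at h; exact h ▸ hcont
            · exact (m3 x).mpr (Or.inr h)
        have m5' : GoodQ parent dist jtime visited'
            (qA ++ [(nb.1, dc + nb.2, dc + pvJT Journey_time c nb.1, pc ++ [nb.1])]) := by
          apply GoodQ_snoc _ _ _ _ _ _ m5
          exact Or.inl (by rw [m1]; exact hnbq)
        have hsc' : (dc = dist.getD c 0 ∧
            ∀ fuel, parent.size + 1 ≤ fuel → followRev parent fuel c = pc.reverse) ∨
            (∀ nb' ∈ nbrs, nb'.1 ∉ visited' → nb'.1 ∈ qB ++ [nb.1]) := by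
          rcases hsc with h | h
          · exact Or.inl h
          · exact Or.inr (fun nb' hm hnv =>
              List.mem_append_left _ (h nb' (List.mem_cons_of_mem _ hm) hnv))
        obtain ⟨hI', hmono, hnbs⟩ := ih _ _ _ _ _ ⟨m1', m3', m4, m7, m5', mc⟩ hsc'
        refine ⟨hI', ?_, ?_⟩
        · exact fun y hy => hmono y (List.mem_append_left _ hy)
        · intro nb' hm
          rcases List.mem_cons.mp hm with h | h
          · exact Or.inr (h ▸ hmono nb.1 (List.mem_append_right _ (by simp)))
          · exact hnbs nb' h
      · -- first enqueue of nb.1: record parent/dist/jtime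
        have hcontf : dist.contains nb.1 = false := by
          cases h : dist.contains nb.1
          · rfl
          · exact absurd h hcont
        have hsc1 : dc = dist.getD c 0 ∧
            ∀ fuel, parent.size + 1 ≤ fuel → followRev parent fuel c = pc.reverse := by
          rcases hsc with h | h
          · exact h
          · exact absurd ((m3 nb.1).mpr (Or.inl (h nb (List.mem_cons_self) hv)))
              (by simp [hcontf])
        obtain ⟨hdc, hfc⟩ := hsc1
        have hnq : nb.1 ∉ qB := fun h => by
          rw [(m3 nb.1).mpr (Or.inl h)] at hcontf; cases hcontf
        have hparf : parent.contains nb.1 = false := by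
          cases h : parent.contains nb.1
          · rfl
          · rw [m7 nb.1 h] at hcontf; cases hcontf
        have hcn : c ≠ nb.1 := fun he => hv (he ▸ hc)
        have hA : stepA Journey_time c visited' dc pc qA nb =
            qA ++ [(nb.1, dc + nb.2, dc + pvJT Journey_time c nb.1, pc ++ [nb.1])] := by
          simp [stepA, hv]
        have hB : stepB Journey_time c visited' (qB, parent, dist, jtime) nb =
            (qB ++ [nb.1], parent.insert nb.1 c,
             dist.insert nb.1 (dist.getD c 0 + nb.2),
             jtime.insert nb.1 (dist.getD c 0 + pvJT Journey_time c nb.1)) := by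
          simp [stepB, hv, hcontf]
        simp only [List.foldl_cons, hA, hB]
        have m1' : (qA ++ [(nb.1, dc + nb.2, dc + pvJT Journey_time c nb.1, pc ++ [nb.1])]).map
            (fun e => e.1) = qB ++ [nb.1] := by simp [m1]
        have m3' : ∀ x : String,
            (dist.insert nb.1 (dist.getD c 0 + nb.2)).contains x = true ↔
            (x ∈ qB ++ [nb.1] ∨ x ∈ visited') := by
          intro x
          rw [PySem.Dict.contains_insert]
          constructor
          · intro h
            rcases Bool.or_eq_true_iff.mp h with h | h
            · exact Or.inl (List.mem_append_right _ (by simp [beq_iff_eq.mp h]))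
            · rcases (m3 x).mp h with h | h
              · exact Or.inl (List.mem_append_left _ h)
              · exact Or.inr h
          · intro h
            rcases h with h | h
            · rcases List.mem_append.mp h with h | h
              · rw [(m3 x).mpr (Or.inl h)]; simp
              · simp at h; simp [h]
            · rw [(m3 x).mpr (Or.inr h)]; simp
        have hvals : (parent.insert nb.1 c).values = parent.values ++ [c] := by
          unfold PySem.Dict.values
          rw [PySem.Dict.items_insert_of_not_contains _ _ hparf]
          simp
        have m4' : ∀ v ∈ (parent.insert nb.1 c).values, v ∈ visited' := by
          intro v hvv
          rw [hvals] at hvv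
          rcases List.mem_append.mp hvv with h | h
          · exact m4 v h
          · simp at h; exact h ▸ hc
        have m7' : ∀ x : String, (parent.insert nb.1 c).contains x = true →
            (dist.insert nb.1 (dist.getD c 0 + nb.2)).contains x = true := by
          intro x h
          rw [PySem.Dict.contains_insert] at h ⊢
          rcases Bool.or_eq_true_iff.mp h with h | h
          · simp [h]
          · simp [m7 x h]
        have hnqA : nb.1 ∉ qA.map (fun e => e.1) := by rw [m1]; exact hnq
        have hsize : (parent.insert nb.1 c).size = parent.size + 1 := by
          rw [PySem.Dict.size_insert, if_neg (by simp [hparf])]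
        have m5' : GoodQ (parent.insert nb.1 c)
            (dist.insert nb.1 (dist.getD c 0 + nb.2))
            (jtime.insert nb.1 (dist.getD c 0 + pvJT Journey_time c nb.1)) visited'
            (qA ++ [(nb.1, dc + nb.2, dc + pvJT Journey_time c nb.1, pc ++ [nb.1])]) := by
          apply GoodQ_snoc
          · exact GoodQ_insert_fresh parent dist jtime visited' qA nb.1 c _ _ m5 hnqA hparf m4 hv
          · refine Or.inr ⟨?_, ?_, ?_⟩
            · simp only [PySem.Dict.getD_insert_self, hdc]
            · simp only [PySem.Dict.getD_insert_self, hdc]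
            · intro fuel hf
              rw [hsize] at hf
              obtain ⟨f, rfl⟩ : ∃ f, fuel = f + 1 := ⟨fuel - 1, by omega⟩
              simp only [followRev, PySem.Dict.get?_insert_self]
              rw [followRev_insert_fresh parent nb.1 c visited' m4 hv f c hcn]
              rw [hfc f (by omega)]
              simp
        have mc' : (dist.insert nb.1 (dist.getD c 0 + nb.2)).contains c = true := by
          rw [PySem.Dict.contains_insert]; simp [mc]
        have hsc' : (dc = (dist.insert nb.1 (dist.getD c 0 + nb.2)).getD c 0 ∧
            ∀ fuel, (parent.insert nb.1 c).size + 1 ≤ fuel →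
              followRev (parent.insert nb.1 c) fuel c = pc.reverse) ∨
            (∀ nb' ∈ nbrs, nb'.1 ∉ visited' → nb'.1 ∈ qB ++ [nb.1]) := by
          refine Or.inl ⟨?_, ?_⟩
          · rw [PySem.Dict.getD_insert_of_ne _ _ _ hcn]; exact hdc
          · intro fuel hf
            rw [hsize] at hf
            rw [followRev_insert_fresh parent nb.1 c visited' m4 hv fuel c hcn]
            exact hfc fuel (by omega)
        obtain ⟨hI', hmono, hnbs⟩ := ih _ _ _ _ _ ⟨m1', m3', m4', m7', m5', mc'⟩ hsc'
        refine ⟨hI', ?_, ?_⟩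
        · exact fun y hy => hmono y (List.mem_append_left _ hy)
        · intro nb' hm
          rcases List.mem_cons.mp hm with h | h
          · exact Or.inr (h ▸ hmono nb.1 (List.mem_append_right _ (by simp)))
          · exact hnbs nb' h

theorem loop_eq (distances Journey_time : List (String × List (String × Int))) (target : String) :
    ∀ (fuel : Nat) (qA : List (String × Int × Int × List String)) (visited : PySem.Set String)
      (qB : List String) (parent : PySem.Dict String String) (dist jtime : PySem.Dict String Int),
    BfsInv distances target qA visited qB parent dist jtime →
    bfsLoopA distances Journey_time target fuel qA visited =
      bfsLoopB distances Journey_time target fuel qB visited parent dist jtime := by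
  intro fuel
  induction fuel with
  | zero => intro qA visited qB parent dist jtime _; rfl
  | succ f ih =>
    intro qA visited qB parent dist jtime hI
    obtain ⟨m1, m2, m3, m4, m7, m5, m6⟩ := hI
    cases qA with
    | nil =>
      have : qB = [] := by simpa using m1.symm
      subst this; rfl
    | cons e restA =>
      obtain ⟨c, d, t, p⟩ := e
      obtain ⟨restB, rfl, hrest⟩ : ∃ restB, qB = c :: restB ∧ restA.map (fun e => e.1) = restB := by
        cases qB with
        | nil => simp at m1
        | cons b bs =>
          simp only [List.map_cons, List.cons.injEq] at m1
          exact ⟨bs, by rw [m1.1], m1.2⟩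
      by_cases hct : c = target
      · subst hct
        obtain ⟨h1, h2, h3⟩ := m5 [] c d t p restA rfl (by simp) m2
        simp only [bfsLoopA, bfsLoopB]
        rw [h3 (parent.size + 1) (by omega)]
        simp [h1, h2]
      · simp only [bfsLoopA, bfsLoopB, if_neg hct]
        have hcv' : c ∈ PySem.Set.add visited c :=
          (PySem.Set.mem_add visited c c).mpr (Or.inr rfl)
        have hFI : FoldInv c (PySem.Set.add visited c) restA restB parent dist jtime := by
          refine ⟨hrest, ?_, ?_, m7, ?_, ?_⟩
          · intro x
            rw [m3 x]
            constructor
            · intro h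
              rcases h with h | h
              · rcases List.mem_cons.mp h with h | h
                · exact Or.inr ((PySem.Set.mem_add visited c x).mpr (Or.inr h))
                · exact Or.inl h
              · exact Or.inr ((PySem.Set.mem_add visited c x).mpr (Or.inl h))
            · intro h
              rcases h with h | h
              · exact Or.inl (List.mem_cons_of_mem _ h)
              · rcases (PySem.Set.mem_add visited c x).mp h with h | h
                · exact Or.inr h
                · exact Or.inl (h ▸ List.mem_cons_self)
          · exact fun v hv => (PySem.Set.mem_add visited c v).mpr (Or.inl (m4 v hv))
          · intro pre c' d' t' p' suf h hpre hvis
            have hvis' : c' ∉ visited :=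
              fun hm => hvis ((PySem.Set.mem_add visited c c').mpr (Or.inl hm))
            have hcc : c' ≠ c :=
              fun he => hvis (he ▸ hcv')
            exact m5 ((c, d, t, p) :: pre) c' d' t' p' suf (by rw [h]; rfl) (by
              simp only [List.map_cons, List.mem_cons]
              push Not
              exact ⟨hcc, hpre⟩) hvis'
          · exact (m3 c).mpr (Or.inl List.mem_cons_self)
        have hsc : (d = dist.getD c 0 ∧
            ∀ fl, parent.size + 1 ≤ fl → followRev parent fl c = p.reverse) ∨
            (∀ nb ∈ pvNbrs distances c, nb.1 ∉ PySem.Set.add visited c → nb.1 ∈ restB) := by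
          by_cases hcvis : c ∈ visited
          · refine Or.inr ?_
            intro nb hm hnv
            have : nb.1 ∈ visited ∨ nb.1 ∈ c :: restB := m6 c hcvis nb hm
            rcases this with h | h
            · exact absurd ((PySem.Set.mem_add visited c nb.1).mpr (Or.inl h)) hnv
            · rcases List.mem_cons.mp h with h | h
              · exact absurd ((PySem.Set.mem_add visited c nb.1).mpr (Or.inr h)) hnv
              · exact h
          · obtain ⟨h1, h2, h3⟩ := m5 [] c d t p restA rfl (by simp) hcvis
            exact Or.inl ⟨h1, h3⟩
        obtain ⟨⟨n1, n3, n4, n7, n5, _⟩, hmono, hnbs⟩ :=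
          fold_inv Journey_time c (PySem.Set.add visited c) d p hcv'
            (pvNbrs distances c) restA restB parent dist jtime hFI hsc
        apply ih
        refine ⟨n1, ?_, n3, n4, n7, n5, ?_⟩
        · intro hm
          rcases (PySem.Set.mem_add visited c target).mp hm with h | h
          · exact m2 h
          · exact hct h.symm
        · intro v hv nb hm
          rcases (PySem.Set.mem_add visited c v).mp hv with h | h
          · rcases m6 v h nb hm with h' | h'
            · exact Or.inl ((PySem.Set.mem_add visited c nb.1).mpr (Or.inl h'))
            · rcases List.mem_cons.mp h' with h'' | h''
              · exact Or.inl (h'' ▸ hcv')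
              · exact Or.inr (hmono nb.1 h'')
          · subst h
            exact hnbs nb hm

-- ===== VERDICT (by name: the statement is the Claim_ definition above) =====
theorem bfs_spec : Claim_equal_bfs := by
  intro distances Journey_time start_city target_city _ _
  unfold Spec_bfs bfs bfs_alt
  apply loop_eq
  have hcont : ∀ x : String,
      (PySem.Dict.mk [(start_city, (0:Int))]).contains x = (start_city == x) := by
    intro x
    simp [PySem.Dict.contains]
  have hgetD : (PySem.Dict.mk [(start_city, (0:Int))]).getD start_city 0 = 0 := by
    simp [PySem.Dict.getD, PySem.Dict.get?, List.find?]
  refine ⟨by simp, by simp [PySem.Set.empty], ?_, ?_, ?_, ?_, ?_⟩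
  · intro x
    rw [hcont x]
    constructor
    · intro hh
      exact Or.inl (by simp [beq_iff_eq.mp hh])
    · intro hh
      rcases hh with hh | hh
      · have hx : x = start_city := by simpa using hh
        simp [hx]
      · cases hh
  · intro v hv; simp [PySem.Dict.values] at hv
  · intro x h; simp [PySem.Dict.contains] at h
  · intro pre c d t p suf h hpre hvis
    have hdec : pre = [] ∧ (c, d, t, p) = (start_city, (0:Int), (0:Int), [start_city]) ∧ suf = [] := by
      cases pre with
      | nil =>
        simp only [List.nil_append, List.cons.injEq] at h
        exact ⟨rfl, h.1.symm, by simpa using h.2.symm⟩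
      | cons a as =>
        simp only [List.cons_append] at h
        have hlen := congrArg List.length h
        simp only [List.length_cons, List.length_append, List.length_nil] at hlen
        omega
    obtain ⟨_, he, _⟩ := hdec
    cases he
    refine ⟨hgetD.symm, hgetD.symm, ?_⟩
    intro fuel hf
    obtain ⟨f, rfl⟩ : ∃ f, fuel = f + 1 := ⟨fuel - 1, by omega⟩
    simp [followRev, PySem.Dict.get?]
  · intro c hc; simp [PySem.Set.empty] at hc
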